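-- pv_equiv track=rewrite | github.com/itingtsai/Facade_Layout_Compiler | archive/facade_enhanced.py | apply_symmetry
-- ===== SOURCE A (Python) =====
-- def apply_symmetry(grid):
--     """Auto-expand symmetry: mirror each row"""
--     transformed = []
--     for row in grid:
--         mid = len(row) // 2
--         left_half = row[:mid]
--         # Mirror to create symmetry
--         mirrored_row = left_half + left_half[::-1]
--         if len(row) % 2 == 1:
--             mirrored_row = left_half + [row[mid]] + left_half[::-1]
--         transformed.append(mirrored_row)
--     return transformed
-- ===== SOURCE B (Python) =====
-- def apply_symmetry(grid):
--     """Auto-expand symmetry: mirror each row (index-reflection form)."""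
--     return [[row[min(i, len(row) - 1 - i)] for i in range(len(row))]
--             for row in grid]
-- ===== Notes on version B (the rewrite author's own statement) =====
-- stated objective: simpler
-- what changed: Each output row is computed by reflecting each index onto its mirror partner (row[min(i, n-1-i)]), replacing A's half-slice, reversed slice, middle-element branch and accumulator loop with one nested comprehension.
import Mathlib
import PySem

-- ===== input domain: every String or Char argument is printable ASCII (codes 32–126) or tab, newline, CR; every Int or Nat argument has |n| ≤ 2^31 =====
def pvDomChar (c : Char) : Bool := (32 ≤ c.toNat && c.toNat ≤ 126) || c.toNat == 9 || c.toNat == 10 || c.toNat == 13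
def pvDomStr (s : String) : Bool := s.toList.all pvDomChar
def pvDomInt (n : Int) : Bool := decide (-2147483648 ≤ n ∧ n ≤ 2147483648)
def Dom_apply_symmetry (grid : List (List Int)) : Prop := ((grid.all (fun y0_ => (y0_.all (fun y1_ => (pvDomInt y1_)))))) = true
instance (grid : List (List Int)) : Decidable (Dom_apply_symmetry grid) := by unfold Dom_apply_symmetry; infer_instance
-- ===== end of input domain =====

-- B mirrors each row by direct index reflection (row[min(i, n-1-i)]) instead of
-- A's half-slice + reversed slice + odd-middle branch; objective: simpler.

-- ===== PORT A =====
-- per-row body of A's loop: mid = len(row)//2, left = row[:mid],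
-- mirrored = left + left[::-1], replaced by left + [row[mid]] + left[::-1] when odd
-- (left[::-1] ported as .reverse per PySem slice?_none_none_neg_one; row[mid] is in
-- range exactly when the row is odd, so pyGet? … |>.getD 0 is exact there)
def pvMirrorRowA (row : List Int) : List Int :=
  let mid := row.length / 2
  let left := PySem.List.slice row none (some (mid : Int))
  if row.length % 2 = 1 then
    left ++ [(PySem.List.pyGet? row (mid : Int)).getD 0] ++ left.reverse
  else
    left ++ left.reverse

def apply_symmetry (grid : List (List Int)) : List (List Int) :=
  grid.foldl (fun transformed row => transformed ++ [pvMirrorRowA row]) []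

-- ===== PORT B =====
-- [row[min(i, len(row)-1-i)] for i in range(len(row))]; the index is provably in
-- range for i < len(row), so List.getD is exact
def pvMirrorRowB (row : List Int) : List Int :=
  (List.range row.length).map (fun i => row.getD (min i (row.length - 1 - i)) 0)

def apply_symmetry_alt (grid : List (List Int)) : List (List Int) :=
  grid.map pvMirrorRowB

-- ===== PRECONDITION & SPEC =====
def Spec_apply_symmetry (grid : List (List Int)) (out : List (List Int)) : Prop := out = apply_symmetry_alt grid
instance (grid : List (List Int)) (out : List (List Int)) : Decidable (Spec_apply_symmetry grid out) := by unfold Spec_apply_symmetry; infer_instance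

-- ===== CLAIM (what is proved, stated in full; the proofs are below) =====
def Claim_equal_apply_symmetry : Prop := ∀ (grid : List (List Int)), Dom_apply_symmetry grid → Spec_apply_symmetry grid (apply_symmetry grid)

-- ===== LEMMAS AND PROOFS =====

theorem pvMirrorRow_eq (row : List Int) : pvMirrorRowA row = pvMirrorRowB row := by
  unfold pvMirrorRowA pvMirrorRowB
  simp only [PySem.List.slice_to_natCast, PySem.List.pyGet?_natCast]
  set n := row.length with hn
  have hlen : (List.take (n / 2) row).length = n / 2 := by
    simp [List.length_take]; omega
  by_cases hodd : n % 2 = 1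
  · rw [if_pos hodd]; simp only [List.append_assoc]
    apply List.ext_getElem
    · simp [List.length_take]; omega
    · intro i h1 h2
      simp only [List.length_map, List.length_range] at h2
      rw [List.getElem_map, List.getElem_range,
        List.getD_eq_getElem row 0 (by omega : min i (n - 1 - i) < row.length)]
      by_cases hlt : i < n / 2
      · rw [List.getElem_append_left (by omega : i < (List.take (n / 2) row).length),
          List.getElem_take]
        congr 1; omega
      · rw [List.getElem_append_right (by omega : (List.take (n / 2) row).length ≤ i)]
        by_cases hmid : i = n / 2
        · rw [List.getElem_append_left
            (by simp only [List.length_singleton]; omega :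
              i - (List.take (n / 2) row).length < ([row[n / 2]?.getD 0] : List Int).length)]
          rw [List.getElem_singleton]
          have hm : n / 2 < row.length := by omega
          rw [List.getElem?_eq_getElem hm]
          simp only [Option.getD_some]
          congr 1; omega
        · rw [List.getElem_append_right
            (by simp only [List.length_singleton]; omega :
              ([row[n / 2]?.getD 0] : List Int).length ≤ i - (List.take (n / 2) row).length)]
          simp only [List.length_singleton, List.getElem_reverse, List.getElem_take]
          congr 1
          simp only [hlen]
          omega
  · rw [if_neg hodd]
    apply List.ext_getElem
    · simp [List.length_take]; omega
    · intro i h1 h2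
      simp only [List.length_map, List.length_range] at h2
      rw [List.getElem_map, List.getElem_range,
        List.getD_eq_getElem row 0 (by omega : min i (n - 1 - i) < row.length)]
      by_cases hlt : i < n / 2
      · rw [List.getElem_append_left (by omega : i < (List.take (n / 2) row).length),
          List.getElem_take]
        congr 1; omega
      · rw [List.getElem_append_right (by omega : (List.take (n / 2) row).length ≤ i)]
        simp only [List.getElem_reverse, List.getElem_take]
        congr 1
        simp only [hlen]
        omega

theorem pvFoldl_append_map (grid acc : List (List Int)) :
    grid.foldl (fun transformed row => transformed ++ [pvMirrorRowA row]) acc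
      = acc ++ grid.map pvMirrorRowB := by
  induction grid generalizing acc with
  | nil => simp
  | cons r rs ih =>
    rw [List.foldl_cons, ih, pvMirrorRow_eq]
    simp

-- ===== VERDICT (by name: the statement is the Claim_ definition above) =====
theorem apply_symmetry_spec : Claim_equal_apply_symmetry := by
  intro grid _
  unfold Spec_apply_symmetry apply_symmetry apply_symmetry_alt
  simpa using pvFoldl_append_map grid []
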